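-- pv_equiv track=rewrite | github.com/d2xi/Advent-of-Code | 22/d08_treetop_tree_house/src/task2.py | view_range_map_1d_l2r_direction
-- ===== SOURCE A (Python) =====
-- def view_range_map_1d_l2r_direction(list_1d):
--     num_trees = len(list_1d)
--     last = num_trees-1
--     view_range_counts = []
--     for beg in range(num_trees):
--         val_beg = list_1d[beg]
--         end = beg+1
--         view_range = 0
--         while end <= last:
--             val_end = list_1d[end]
--             view_range += 1
--             if val_beg <= val_end:
--                 break
--             end += 1
--         view_range_counts.append(view_range)
--
--     return view_range_counts
-- ===== SOURCE B (Python) =====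
-- def view_range_map_1d_l2r_direction(list_1d):
--     # Monotonic stack, right-to-left: O(n) instead of A's quadratic rescans.
--     n = len(list_1d)
--     res = []
--     stack = []  # indices of a non-decreasing (bottom<-top) chain of later trees
--     for i in range(n - 1, -1, -1):
--         v = list_1d[i]
--         while stack and list_1d[stack[-1]] < v:
--             stack.pop()
--         res.append(stack[-1] - i if stack else n - 1 - i)
--         stack.append(i)
--     res.reverse()
--     return res
-- ===== Notes on version B (the rewrite author's own statement) =====
-- stated objective: faster
-- what changed: Replaces A's per-tree rightward rescan (nested while loop, O(n^2) on decreasing lists) with a single right-to-left pass maintaining a monotonic stack of indices, O(n) total.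
import Mathlib
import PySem

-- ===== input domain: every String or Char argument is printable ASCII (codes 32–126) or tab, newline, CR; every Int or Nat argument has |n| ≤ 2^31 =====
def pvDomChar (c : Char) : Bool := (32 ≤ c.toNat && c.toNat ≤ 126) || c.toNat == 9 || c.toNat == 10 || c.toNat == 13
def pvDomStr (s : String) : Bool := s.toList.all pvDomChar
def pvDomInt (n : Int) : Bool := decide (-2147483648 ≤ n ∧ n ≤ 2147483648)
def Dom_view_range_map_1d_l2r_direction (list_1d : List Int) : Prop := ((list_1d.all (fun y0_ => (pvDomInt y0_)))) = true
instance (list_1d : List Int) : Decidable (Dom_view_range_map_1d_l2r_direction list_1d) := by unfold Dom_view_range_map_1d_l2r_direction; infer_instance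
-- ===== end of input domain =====

-- B replaces A's nested rightward rescan with one right-to-left monotonic-stack pass (O(n) vs A's quadratic worst case, measured faster in a timing run; equal output).

-- ===== PORT A =====
-- inner `while end <= last` loop of A; indices kept as Nat (always ≥ 0 in A),
-- `e < n` ≡ Python's `end <= last` (= n-1); fuel n always suffices; list_1d[end]
-- read via getD (index provably in range when taken).
def aWhile (l : List Int) (n : Nat) (v : Int) : Nat → Nat → Int → Int
  | 0, _, vr => vr
  | fuel + 1, e, vr =>
      if e < n then
        let ve := l.getD e 0
        let vr' := vr + 1
        if v ≤ ve then vr' else aWhile l n v fuel (e + 1) vr'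
      else vr

def view_range_map_1d_l2r_direction (list_1d : List Int) : List Int :=
  let n := list_1d.length
  (List.range n).foldl (fun acc beg =>
      acc ++ [aWhile list_1d n (list_1d.getD beg 0) n (beg + 1) 0]) []

-- ===== PORT B =====
-- `while stack and list_1d[stack[-1]] < v: stack.pop()`; stack top at list head
def bPop (l : List Int) (v : Int) : List Nat → List Nat
  | [] => []
  | j :: s => if l.getD j 0 < v then bPop l v s else j :: s

-- the `for i in range(n-1,-1,-1)` loop of Source B, counting i+1 down to 0; appends to res
def bGo (l : List Int) (n : Nat) : Nat → List Nat → List Int → List Int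
  | 0, _, res => res
  | i + 1, stack, res =>
      let v := l.getD i 0
      let stack' := bPop l v stack
      let r : Int := match stack'.head? with
        | some j => (j : Int) - (i : Int)
        | none => (n : Int) - 1 - (i : Int)
      bGo l n i (i :: stack') (res ++ [r])

def view_range_map_1d_l2r_direction_alt (list_1d : List Int) : List Int :=
  let n := list_1d.length
  (bGo list_1d n n [] []).reverse

-- ===== PRECONDITION & SPEC =====
def Spec_view_range_map_1d_l2r_direction (list_1d : List Int) (out : List Int) : Prop := out = view_range_map_1d_l2r_direction_alt list_1d
instance (list_1d : List Int) (out : List Int) : Decidable (Spec_view_range_map_1d_l2r_direction list_1d out) := by unfold Spec_view_range_map_1d_l2r_direction; infer_instance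

-- ===== CLAIM (what is proved, stated in full; the proofs are below) =====
def Claim_equal_view_range_map_1d_l2r_direction : Prop := ∀ (list_1d : List Int), Dom_view_range_map_1d_l2r_direction list_1d → Spec_view_range_map_1d_l2r_direction list_1d (view_range_map_1d_l2r_direction list_1d)

-- ===== LEMMAS AND PROOFS =====

-- counting form of A's inner loop
def cnt (v : Int) : List Int → Int
  | [] => 0
  | x :: r => if v ≤ x then 1 else 1 + cnt v r

-- first index j ≥ i with v ≤ l[j]
def fGe (l : List Int) (v : Int) (i : Nat) : Option Nat :=
  ((l.drop i).findIdx? (fun x => v ≤ x)).map (· + i)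

-- the common elementwise specification
def specVal (l : List Int) (i : Nat) : Int :=
  match fGe l (l.getD i 0) (i + 1) with
  | some j => (j : Int) - (i : Int)
  | none => (l.length : Int) - 1 - (i : Int)

theorem aWhile_eq_cnt (l : List Int) (v : Int) :
    ∀ fuel e vr, l.length - e ≤ fuel →
      aWhile l l.length v fuel e vr = vr + cnt v (l.drop e) := by
  intro fuel
  induction fuel with
  | zero =>
    intro e vr h
    have : l.length ≤ e := by omega
    simp [aWhile, List.drop_eq_nil_of_le this, cnt]
  | succ fuel ih =>
    intro e vr h
    by_cases he : e < l.length
    · have hd : l.drop e = l[e] :: l.drop (e + 1) := List.drop_eq_getElem_cons he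
      have hg : l.getD e 0 = l[e] := List.getD_eq_getElem l 0 he
      by_cases hv : v ≤ l[e]
      · simp only [aWhile, if_pos he, hg, hd, cnt, if_pos hv]
      · simp only [aWhile, if_pos he, hg, if_neg hv]
        rw [ih (e + 1) (vr + 1) (by omega), hd]
        simp [cnt, hv]; ring
    · have : l.length ≤ e := by omega
      simp [aWhile, he, List.drop_eq_nil_of_le this, cnt]

theorem foldl_append_map {α β : Type} (f : α → β) :
    ∀ (xs : List α) (acc : List β),
      xs.foldl (fun a x => a ++ [f x]) acc = acc ++ xs.map f := by
  intro xs
  induction xs with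
  | nil => simp
  | cons x xs ih => intro acc; simp [List.foldl_cons, ih]

theorem A_eq_map (l : List Int) :
    view_range_map_1d_l2r_direction l
      = (List.range l.length).map (fun i => cnt (l.getD i 0) (l.drop (i + 1))) := by
  unfold view_range_map_1d_l2r_direction
  rw [foldl_append_map]
  simp only [List.nil_append]
  apply List.map_congr_left
  intro i hi
  rw [aWhile_eq_cnt l (l.getD i 0) l.length (i + 1) 0 (by omega), zero_add]

theorem cnt_findIdx? (v : Int) :
    ∀ xs : List Int, cnt v xs =
      match xs.findIdx? (fun x => v ≤ x) with
      | some k => (k : Int) + 1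
      | none => (xs.length : Int) := by
  intro xs
  induction xs with
  | nil => simp [cnt]
  | cons x r ih =>
    by_cases hv : v ≤ x
    · simp [cnt, hv, List.findIdx?_cons]
    · simp only [cnt, List.findIdx?_cons, decide_eq_true_eq, hv, if_false, ih]
      cases h : r.findIdx? (fun x => v ≤ x) with
      | none => simp [h]; push_cast; ring
      | some k => simp [h]; push_cast; ring

theorem cnt_eq_specVal (l : List Int) (i : Nat) (hi : i < l.length) :
    cnt (l.getD i 0) (l.drop (i + 1)) = specVal l i := by
  rw [cnt_findIdx?]
  unfold specVal fGe
  cases h : (l.drop (i + 1)).findIdx? (fun x => l.getD i 0 ≤ x) with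
  | none =>
      simp only [Option.map_none, List.length_drop]
      rw [Nat.cast_sub (by omega : i + 1 ≤ l.length)]
      push_cast
      ring
  | some k => simp [h]; push_cast; ring

theorem bPop_eq_dropWhile (l : List Int) (v : Int) :
    ∀ s : List Nat, bPop l v s = s.dropWhile (fun j => l.getD j 0 < v) := by
  intro s
  induction s with
  | nil => rfl
  | cons j s ih =>
    by_cases h : l.getD j 0 < v <;> simp [bPop, h, List.dropWhile_cons, ih]

theorem dropWhile_dropWhile {α : Type} (p q : α → Bool) (h : ∀ x, q x = true → p x = true) :
    ∀ xs : List α, (xs.dropWhile q).dropWhile p = xs.dropWhile p := by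
  intro xs
  induction xs with
  | nil => rfl
  | cons x xs ih =>
    by_cases hq : q x = true
    · have hp := h x hq
      simp [List.dropWhile_cons, hq, hp, ih]
    · simp [List.dropWhile_cons, hq]

-- the stack invariant: popping with threshold v exposes the first later index with value ≥ v
def StackInv (l : List Int) (i : Nat) (s : List Nat) : Prop :=
  ∀ v : Int, (bPop l v s).head? = fGe l v i

theorem fGe_cons (l : List Int) (v : Int) (i : Nat) (hi : i < l.length) :
    fGe l v i = if v ≤ l[i] then some i else fGe l v (i + 1) := by
  unfold fGe
  rw [List.drop_eq_getElem_cons hi, List.findIdx?_cons]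
  by_cases hv : v ≤ l[i]
  · simp [hv]
  · simp only [decide_eq_true_eq, hv, if_false, Option.map_map]
    cases h : (l.drop (i + 1)).findIdx? (fun x => v ≤ x) <;> simp [h]; omega

theorem StackInv_step (l : List Int) (i : Nat) (s : List Nat) (hi : i < l.length)
    (hSInv : StackInv l (i + 1) s) : StackInv l i (i :: bPop l (l.getD i 0) s) := by
  intro w
  have hg : l.getD i 0 = l[i] := List.getD_eq_getElem l 0 hi
  by_cases hw : w ≤ l[i]
  · have hcond : ¬ (l.getD i 0 < w) := by rw [hg]; omega
    rw [fGe_cons l w i hi, if_pos hw]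
    simp only [bPop]
    rw [if_neg hcond]
    rfl
  · have hlt : l.getD i 0 < w := by rw [hg]; omega
    have hpp : bPop l w (bPop l (l.getD i 0) s) = bPop l w s := by
      rw [bPop_eq_dropWhile, bPop_eq_dropWhile, bPop_eq_dropWhile]
      refine dropWhile_dropWhile _ _ ?_ s
      intro x hx
      exact decide_eq_true (lt_trans (of_decide_eq_true hx) hlt)
    rw [fGe_cons l w i hi, if_neg hw]
    simp only [bPop]
    rw [if_pos hlt, hpp, hSInv w]

theorem bGo_eq (l : List Int) :
    ∀ (i : Nat) (s : List Nat) (res : List Int), i ≤ l.length → StackInv l i s →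
      bGo l l.length i s res = res ++ ((List.range i).map (specVal l)).reverse := by
  intro i
  induction i with
  | zero => intro s res _ _; simp [bGo]
  | succ i ih =>
    intro s res hle hSInv
    have hi : i < l.length := by omega
    have hr : (match (bPop l (l.getD i 0) s).head? with
        | some j => (j : Int) - (i : Int)
        | none => (l.length : Int) - 1 - (i : Int)) = specVal l i := by
      rw [hSInv (l.getD i 0)]; rfl
    simp only [bGo]
    rw [hr, ih (i :: bPop l (l.getD i 0) s) (res ++ [specVal l i]) (by omega)
        (StackInv_step l i s hi hSInv)]
    simp [List.range_succ]

theorem B_eq_map (l : List Int) :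
    view_range_map_1d_l2r_direction_alt l = (List.range l.length).map (specVal l) := by
  show (bGo l l.length l.length [] []).reverse = _
  have h0 : StackInv l l.length [] := by
    intro v
    simp [bPop, fGe, List.drop_eq_nil_of_le (le_refl l.length)]
  rw [bGo_eq l l.length [] [] (le_refl _) h0]
  simp

-- ===== VERDICT (by name: the statement is the Claim_ definition above) =====
theorem view_range_map_1d_l2r_direction_spec : Claim_equal_view_range_map_1d_l2r_direction := by
  intro l _
  unfold Spec_view_range_map_1d_l2r_direction
  rw [A_eq_map, B_eq_map]
  apply List.map_congr_left
  intro i hi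
  exact cnt_eq_specVal l i (List.mem_range.mp hi)
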